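-- pv_equiv track=rewrite | github.com/emgrise/pythonProject | test.py | rev_text
-- ===== SOURCE A (Python) =====
-- def rev_text(text: str) -> str:
--     """ Reverse string"""
--     text_list = text.split(' ')
--
--     new_list = []
--     for word in text_list:
--         letters = [char for char in word if char.isalpha()]
--         dig_and_syb = [char for char in word if not char.isalpha()]
--         new_list.append(add_sorted(word, letters, dig_and_syb))
--     text = ' '.join(new_list)
--     return text
--
-- def add_sorted(word: str, letters: list, dig_and_syb: list) -> str:
--     """ Adding letters,digital and symbols from lists for create new sorted word. """
--     new_word = ''
--     for char in word:
--         if not char.isalpha():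
--             new_word += dig_and_syb.pop(0)
--         else:
--             new_word += letters.pop()
--     return new_word
-- ===== SOURCE B (Python) =====
-- def rev_text(text: str) -> str:
--     """Reverse the letters of each word in place, keeping non-letters fixed,
--     via a recursive two-pointer pass converging from both ends of the word."""
--     def go(xs):
--         if len(xs) < 2:
--             return xs
--         x, *mid, y = xs
--         if not x.isalpha():
--             return [x] + go(mid + [y])
--         if not y.isalpha():
--             return go([x] + mid) + [y]
--         return [y] + go(mid) + [x]
--
--     return ' '.join(''.join(go(list(w))) for w in text.split(' '))
-- ===== Notes on version B (the rewrite author's own statement) =====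
-- stated objective: alternative
-- what changed: Per word, B reverses the letters in place with a recursive two-pointer pass converging from both ends (swap when both ends are letters, otherwise skip the non-letter end), instead of A's extraction of letters and non-letters into two lists and a forward rebuild popping from them.
import Mathlib
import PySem

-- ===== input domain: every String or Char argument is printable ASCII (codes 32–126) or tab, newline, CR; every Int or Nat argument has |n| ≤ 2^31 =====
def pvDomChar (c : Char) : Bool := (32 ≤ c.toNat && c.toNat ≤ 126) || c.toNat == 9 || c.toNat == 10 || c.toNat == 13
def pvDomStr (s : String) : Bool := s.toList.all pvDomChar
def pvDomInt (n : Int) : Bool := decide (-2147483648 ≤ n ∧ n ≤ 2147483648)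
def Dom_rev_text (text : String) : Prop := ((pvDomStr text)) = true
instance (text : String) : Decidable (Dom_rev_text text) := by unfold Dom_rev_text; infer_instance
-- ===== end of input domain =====

-- B reverses each word's letters with a recursive two-pointer pass from both ends instead of
-- A's extract-into-two-lists-and-rebuild; same values, similar cost (objective: alternative).

-- ===== PORT A =====
-- add_sorted's loop: new_word accumulator, letters popped from the back, dig_and_syb popped
-- from the front.  The empty-pop branches (Python IndexError) are unreachable from rev_text
-- (the lists hold exactly the word's letters / non-letters); there the port appends nothing.
def pvAddSortedGo (word letters digs nw : List Char) : List Char :=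
  match word with
  | [] => nw
  | c :: cs =>
    if !(PySem.Chars.isalpha c) then
      match digs with
      | d :: ds => pvAddSortedGo cs letters ds (nw ++ [d])
      | [] => pvAddSortedGo cs letters [] nw
    else
      match letters.getLast? with
      | some l => pvAddSortedGo cs letters.dropLast digs (nw ++ [l])
      | none => pvAddSortedGo cs [] digs nw

def pv_add_sorted (word letters digs : List Char) : List Char :=
  pvAddSortedGo word letters digs []

def rev_text (text : String) : String :=
  let text_list := PySem.Chars.splitOn text.toList [' ']
  let new_list := text_list.map (fun word =>
    let letters := word.filter (fun c => PySem.Chars.isalpha c)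
    let dig_and_syb := word.filter (fun c => !(PySem.Chars.isalpha c))
    pv_add_sorted word letters dig_and_syb)
  String.ofList (PySem.Chars.join [' '] new_list)

-- ===== PORT B =====
-- Source B's go: x, *mid, y = xs; skip a non-letter end, else swap the two end letters
-- (xs here always has ≥ 2 elements, so getLastD's default is never read).
def pvGo (xs : List Char) : List Char :=
  match xs with
  | [] => []
  | [x] => [x]
  | x :: b :: bs =>
    let y := (b :: bs).getLastD ' '
    let mid := (b :: bs).dropLast
    if !(PySem.Chars.isalpha x) then x :: pvGo (mid ++ [y])
    else if !(PySem.Chars.isalpha y) then pvGo (x :: mid) ++ [y]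
    else y :: (pvGo mid ++ [x])
termination_by xs.length
decreasing_by all_goals simp

def rev_text_alt (text : String) : String :=
  String.ofList (PySem.Chars.join [' '] ((PySem.Chars.splitOn text.toList [' ']).map pvGo))

-- ===== PRECONDITION & SPEC =====
def Spec_rev_text (text : String) (out : String) : Prop := out = rev_text_alt text
instance (text : String) (out : String) : Decidable (Spec_rev_text text out) := by unfold Spec_rev_text; infer_instance

-- ===== CLAIM (what is proved, stated in full; the proofs are below) =====
def Claim_equal_rev_text : Prop := ∀ (text : String), Dom_rev_text text → Spec_rev_text text (rev_text text)

-- ===== LEMMAS AND PROOFS =====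

-- Common specification of both ports, per word: walk the word, taking successive elements
-- of ls at letter positions and keeping non-letters; with ls = the word's letters reversed
-- this is "reverse the letters, keep non-letters fixed".
def pvMerge (cs ls : List Char) : List Char :=
  match cs, ls with
  | [], _ => []
  | c :: cs, ls =>
    if PySem.Chars.isalpha c then
      match ls with
      | l :: ls' => l :: pvMerge cs ls'
      | [] => c :: pvMerge cs []
    else c :: pvMerge cs ls

theorem pvMerge_append (as bs ls : List Char) :
    pvMerge (as ++ bs) ls
      = pvMerge as ls ++ pvMerge bs (ls.drop (as.countP (fun c => PySem.Chars.isalpha c))) := by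
  induction as generalizing ls with
  | nil => simp [pvMerge]
  | cons a as ih =>
    by_cases h : PySem.Chars.isalpha a
    · cases ls with
      | cons l ls' => simp [pvMerge, h, List.countP_cons, ih]
      | nil =>
        simp only [List.cons_append, pvMerge, h, if_pos, List.drop_nil]
        have := ih ([] : List Char)
        simp at this
        simp [this]
    · simp [pvMerge, h, List.countP_cons, ih]

theorem pvMerge_extend (cs : List Char) :
    ∀ ls extra : List Char, cs.countP (fun c => PySem.Chars.isalpha c) ≤ ls.length →
      pvMerge cs (ls ++ extra) = pvMerge cs ls := by
  induction cs with
  | nil => intro ls extra _; simp [pvMerge]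
  | cons c cs ih =>
    intro ls extra h
    by_cases hc : PySem.Chars.isalpha c
    · cases ls with
      | nil => simp [List.countP_cons, hc] at h
      | cons l ls' =>
        simp [List.countP_cons, hc] at h
        simp [pvMerge, hc, ih ls' extra (by omega)]
    · simp [pvMerge, hc, ih ls extra (by simpa [List.countP_cons, hc] using h)]

theorem length_filter_reverse (l : List Char) :
    ((l.filter (fun c => PySem.Chars.isalpha c)).reverse).length
      = l.countP (fun c => PySem.Chars.isalpha c) := by
  simp [List.countP_eq_length_filter]

theorem pv_cons_split (b : Char) (bs : List Char) :
    b :: bs = (b :: bs).dropLast ++ [(b :: bs).getLastD ' '] := by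
  induction bs generalizing b with
  | nil => simp
  | cons c cs ih => simpa using congrArg (List.cons b) (ih c)

-- B computes the common specification.
theorem pvGo_eq_merge_aux (n : Nat) : ∀ xs : List Char, xs.length ≤ n →
    pvGo xs = pvMerge xs ((xs.filter (fun c => PySem.Chars.isalpha c)).reverse) := by
  induction n with
  | zero =>
    intro xs h
    have hx : xs = [] := List.eq_nil_of_length_eq_zero (Nat.le_zero.mp h)
    subst hx; simp [pvGo, pvMerge]
  | succ n ih =>
    intro xs hlen
    match xs with
    | [] => simp [pvGo, pvMerge]
    | [x] => by_cases h : PySem.Chars.isalpha x <;> simp [pvGo, pvMerge, h]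
    | x :: b :: bs =>
      have hsplit := pv_cons_split b bs
      simp only [pvGo]
      generalize hM : (b :: bs).dropLast = M at *
      generalize hY : (b :: bs).getLastD ' ' = Y at *
      -- hsplit : b :: bs = M ++ [Y]
      have hlenM : M.length = bs.length := by
        have := congrArg List.length hsplit
        simp at this; omega
      have hbs : bs.length + 2 ≤ n + 1 := by simpa using hlen
      by_cases hx : PySem.Chars.isalpha x
      · by_cases hy : PySem.Chars.isalpha Y
        · -- both ends letters: swap
          simp only [hx, hy, Bool.not_true, Bool.false_eq_true, if_false]
          rw [hsplit]
          rw [show x :: (M ++ [Y]) = (x :: M) ++ [Y] by simp, pvMerge_append]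
          have hfilter : ((x :: M) ++ [Y]).filter (fun c => PySem.Chars.isalpha c)
              = x :: (M.filter (fun c => PySem.Chars.isalpha c) ++ [Y]) := by
            simp [List.filter_append, hx, hy]
          rw [hfilter]
          have hrev : (x :: (M.filter (fun c => PySem.Chars.isalpha c) ++ [Y])).reverse
              = Y :: ((M.filter (fun c => PySem.Chars.isalpha c)).reverse ++ [x]) := by simp
          rw [hrev]
          have hcnt : (x :: M).countP (fun c => PySem.Chars.isalpha c)
              = M.countP (fun c => PySem.Chars.isalpha c) + 1 := by
            simp [List.countP_cons, hx]
          have hlenf := length_filter_reverse M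
          have hdrop : ((Y :: ((M.filter (fun c => PySem.Chars.isalpha c)).reverse ++ [x])).drop
              ((x :: M).countP (fun c => PySem.Chars.isalpha c))) = [x] := by
            rw [hcnt]
            simp only [List.drop_succ_cons]
            rw [List.drop_append_of_le_length (by omega)]
            simp [hlenf]
          have hfirst : pvMerge (x :: M)
                (Y :: ((M.filter (fun c => PySem.Chars.isalpha c)).reverse ++ [x]))
              = Y :: pvMerge M ((M.filter (fun c => PySem.Chars.isalpha c)).reverse ++ [x]) := by
            simp [pvMerge, hx]
          rw [hfirst, hdrop, pvMerge_extend M _ [x] (by omega)]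
          have hrec := ih M (by omega)
          simp [pvMerge, hy, hrec]
        · -- right end not a letter: keep it, recurse on x :: M
          simp only [hx, hy, Bool.not_true, Bool.false_eq_true, if_false, Bool.not_false,
            if_true]
          rw [hsplit]
          rw [show x :: (M ++ [Y]) = (x :: M) ++ [Y] by simp, pvMerge_append]
          have hfy : ((x :: M) ++ [Y]).filter (fun c => PySem.Chars.isalpha c)
              = (x :: M).filter (fun c => PySem.Chars.isalpha c) := by
            simp [List.filter_append, hx, hy]
          rw [hfy]
          have hdrop :
              (((x :: M).filter (fun c => PySem.Chars.isalpha c)).reverse).drop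
                  ((x :: M).countP (fun c => PySem.Chars.isalpha c)) = [] :=
            List.drop_eq_nil_of_le (by rw [length_filter_reverse])
          rw [hdrop]
          have hrec := ih (x :: M) (by simp; omega)
          simp [pvMerge, hy, hrec]
      · -- left end not a letter: keep it, recurse on M ++ [Y]
        simp only [hx, Bool.not_false, if_true]
        rw [hsplit]
        have hrec := ih (M ++ [Y]) (by simp; omega)
        simp [pvMerge, hx, List.filter_cons, hrec]

theorem pvGo_eq_merge (xs : List Char) :
    pvGo xs = pvMerge xs ((xs.filter (fun c => PySem.Chars.isalpha c)).reverse) :=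
  pvGo_eq_merge_aux xs.length xs le_rfl

-- A computes the common specification, provided letters is long enough (in rev_text it is
-- exactly the word's letters) and dig_and_syb is exactly the word's non-letters.
theorem pvAddSortedGo_eq_merge (w : List Char) :
    ∀ ls nw : List Char, w.countP (fun c => PySem.Chars.isalpha c) ≤ ls.length →
      pvAddSortedGo w ls (w.filter (fun c => !(PySem.Chars.isalpha c))) nw
        = nw ++ pvMerge w ls.reverse := by
  induction w with
  | nil => intro ls nw _; simp [pvAddSortedGo, pvMerge]
  | cons c cs ih =>
    intro ls nw h
    by_cases hc : PySem.Chars.isalpha c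
    · cases ls with
      | nil => simp [List.countP_cons, hc] at h
      | cons l0 ls0 =>
        have hne : (l0 :: ls0) ≠ [] := by simp
        have hl : (l0 :: ls0).getLast? = some ((l0 :: ls0).getLast hne) :=
          List.getLast?_eq_some_getLast hne
        have h1 : (l0 :: ls0).dropLast ++ [(l0 :: ls0).getLast hne] = l0 :: ls0 :=
          List.dropLast_append_getLast hne
        have hrev : (l0 :: ls0).reverse
            = (l0 :: ls0).getLast hne :: (l0 :: ls0).dropLast.reverse := by
          conv_lhs => rw [← h1]
          simp
        have hcount : cs.countP (fun c => PySem.Chars.isalpha c)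
            ≤ (l0 :: ls0).dropLast.length := by
          simp only [List.countP_cons, hc, if_pos] at h
          simp only [List.length_dropLast, List.length_cons]
          simp at h ⊢
          omega
        have hfil : (c :: cs).filter (fun c => !(PySem.Chars.isalpha c))
            = cs.filter (fun c => !(PySem.Chars.isalpha c)) := by
          simp [List.filter_cons, hc]
        rw [hfil]
        simp only [pvAddSortedGo, hc, Bool.not_true, Bool.false_eq_true, if_false, hl]
        rw [ih (l0 :: ls0).dropLast (nw ++ [(l0 :: ls0).getLast hne]) hcount, hrev]
        simp [pvMerge, hc]
    · have hfil : (c :: cs).filter (fun c => !(PySem.Chars.isalpha c))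
          = c :: cs.filter (fun c => !(PySem.Chars.isalpha c)) := by
        simp [List.filter_cons, hc]
      rw [hfil]
      simp only [pvAddSortedGo, hc, Bool.not_false, if_true]
      rw [ih ls (nw ++ [c]) (by simpa [List.countP_cons, hc] using h)]
      simp [pvMerge, hc]

theorem pv_word_eq (w : List Char) :
    pv_add_sorted w (w.filter (fun c => PySem.Chars.isalpha c))
        (w.filter (fun c => !(PySem.Chars.isalpha c)))
      = pvGo w := by
  rw [pv_add_sorted, pvAddSortedGo_eq_merge w
        (w.filter (fun c => PySem.Chars.isalpha c)) []
        (by simp [List.countP_eq_length_filter]),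
      pvGo_eq_merge]
  simp

-- ===== VERDICT (by name: the statement is the Claim_ definition above) =====
theorem rev_text_spec : Claim_equal_rev_text := by
  intro text _
  unfold Spec_rev_text rev_text rev_text_alt
  simp only []
  congr 2
  apply List.map_congr_left
  intro w _
  exact pv_word_eq w
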